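-- pv_equiv track=rewrite | github.com/mayurtarate2/narendra | chunker.py | _get_topic_from_keywords
-- ===== SOURCE A (Python) =====
-- from typing import List, Dict
--
-- def _get_topic_from_keywords(keywords: List[str]) -> str:
--     """Determine topic from keywords"""
--     # Define topic keywords for insurance/legal documents
--     topic_mapping = {
--         'coverage': ['coverage', 'benefit', 'claim', 'policy', 'insured'],
--         'exclusion': ['exclusion', 'excluded', 'not covered', 'limitation'],
--         'premium': ['premium', 'payment', 'due', 'billing', 'fee'],
--         'medical': ['medical', 'health', 'doctor', 'hospital', 'treatment'],
--         'legal': ['legal', 'court', 'lawsuit', 'liability', 'responsibility'],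
--         'general': []
--     }
--
--     for topic, topic_keywords in topic_mapping.items():
--         if any(keyword in keywords for keyword in topic_keywords):
--             return topic
--
--     return 'general'
-- ===== SOURCE B (Python) =====
-- from typing import List, Dict
--
-- _TOPIC_MAPPING = {
--     'coverage': ['coverage', 'benefit', 'claim', 'policy', 'insured'],
--     'exclusion': ['exclusion', 'excluded', 'not covered', 'limitation'],
--     'premium': ['premium', 'payment', 'due', 'billing', 'fee'],
--     'medical': ['medical', 'health', 'doctor', 'hospital', 'treatment'],
--     'legal': ['legal', 'court', 'lawsuit', 'liability', 'responsibility'],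
--     'general': [],
-- }
-- # inverted index: keyword phrase -> topic  (phrases are unique across topics)
-- _KEYWORD_TO_TOPIC = {kw: topic for topic, kws in _TOPIC_MAPPING.items() for kw in kws}
-- # topic priority in the mapping's original order
-- _PRIORITY = list(_TOPIC_MAPPING)
--
-- def _get_topic_from_keywords(keywords: List[str]) -> str:
--     """Determine topic from keywords (single pass + priority resolution)."""
--     present = set()
--     for k in keywords:
--         topic = _KEYWORD_TO_TOPIC.get(k)
--         if topic is not None:
--             present.add(topic)
--     for topic in _PRIORITY:
--         if topic in present:
--             return topic
--     return 'general'
-- ===== Notes on version B (the rewrite author's own statement) =====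
-- stated objective: faster
-- what changed: Replaced the per-topic nested membership scan over the input with a precomputed keyword-to-topic inverted index, a single pass over the input collecting the set of present topics (O(1) dict lookups), and a walk of the fixed topic-priority list.
import Mathlib
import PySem

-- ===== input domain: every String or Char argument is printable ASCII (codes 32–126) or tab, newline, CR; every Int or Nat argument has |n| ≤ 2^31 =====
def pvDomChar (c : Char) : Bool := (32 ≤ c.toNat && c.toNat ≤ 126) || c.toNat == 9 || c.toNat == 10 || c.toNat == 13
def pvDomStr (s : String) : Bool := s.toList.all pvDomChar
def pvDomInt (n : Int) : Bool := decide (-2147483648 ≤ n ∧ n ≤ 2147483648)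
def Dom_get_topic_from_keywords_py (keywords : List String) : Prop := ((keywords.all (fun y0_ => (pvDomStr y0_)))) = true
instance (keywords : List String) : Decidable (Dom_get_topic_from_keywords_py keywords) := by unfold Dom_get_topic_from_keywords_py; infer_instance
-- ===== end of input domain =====

-- B replaces A's per-topic nested membership scan with an inverted keyword→topic index,
-- one pass over the input collecting the set of present topics, and a priority walk (idiomatic; return value only).

-- ===== PORT A =====
-- the topic_mapping dict of A (insertion order)
def pvTopicMapping : List (String × List String) :=
  [("coverage", ["coverage", "benefit", "claim", "policy", "insured"]),
   ("exclusion", ["exclusion", "excluded", "not covered", "limitation"]),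
   ("premium", ["premium", "payment", "due", "billing", "fee"]),
   ("medical", ["medical", "health", "doctor", "hospital", "treatment"]),
   ("legal", ["legal", "court", "lawsuit", "liability", "responsibility"]),
   ("general", [])]

-- the 'for topic, topic_keywords in topic_mapping.items(): if any(...): return topic' loop
def pvALoop (keywords : List String) : List (String × List String) → String
  | [] => "general"
  | (topic, tks) :: rest =>
      if tks.any (fun kw => keywords.contains kw) then topic else pvALoop keywords rest

def get_topic_from_keywords_py (keywords : List String) : String :=
  pvALoop keywords pvTopicMapping

-- ===== PORT B =====
-- _KEYWORD_TO_TOPIC = {kw: topic for topic, kws in _TOPIC_MAPPING.items() for kw in kws}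
def pvKwIndex : PySem.Dict String String :=
  PySem.Dict.ofList (pvTopicMapping.flatMap (fun p => p.2.map (fun kw => (kw, p.1))))

-- _PRIORITY = list(_TOPIC_MAPPING)
def pvPriority : List String := pvTopicMapping.map (fun p => p.1)

-- the first loop of B: build the set of present topics in one pass over the input
def pvPresent (keywords : List String) : PySem.Set String :=
  keywords.foldl
    (fun s k =>
      match PySem.Dict.get? pvKwIndex k with
      | some topic => PySem.Set.add s topic
      | none => s)
    PySem.Set.empty

-- the second loop of B: first topic of the priority list that is present
def pvPick (present : PySem.Set String) : List String → String
  | [] => "general"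
  | t :: rest => if PySem.Set.contains present t then t else pvPick present rest

def get_topic_from_keywords_py_alt (keywords : List String) : String :=
  pvPick (pvPresent keywords) pvPriority

-- ===== PRECONDITION & SPEC =====
def Spec_get_topic_from_keywords_py (keywords : List String) (out : String) : Prop := out = get_topic_from_keywords_py_alt keywords
instance (keywords : List String) (out : String) : Decidable (Spec_get_topic_from_keywords_py keywords out) := by unfold Spec_get_topic_from_keywords_py; infer_instance

-- ===== CLAIM (what is proved, stated in full; the proofs are below) =====
def Claim_equal_get_topic_from_keywords_py : Prop := ∀ (keywords : List String), Dom_get_topic_from_keywords_py keywords → Spec_get_topic_from_keywords_py keywords (get_topic_from_keywords_py keywords)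

-- ===== LEMMAS AND PROOFS =====

-- membership in the topic set built by B's first loop
theorem mem_pvPresent_fold (keywords : List String) (s : PySem.Set String) (t : String) :
    t ∈ keywords.foldl
      (fun s k =>
        match PySem.Dict.get? pvKwIndex k with
        | some topic => PySem.Set.add s topic
        | none => s) s ↔
    t ∈ s ∨ ∃ k ∈ keywords, PySem.Dict.get? pvKwIndex k = some t := by
  induction keywords generalizing s with
  | nil => simp
  | cons h tl ih =>
    simp only [List.foldl_cons, List.mem_cons]
    cases hk : PySem.Dict.get? pvKwIndex h with
    | none =>
      rw [ih]
      constructor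
      · rintro (hs | ⟨k, hkmem, hget⟩)
        · exact Or.inl hs
        · exact Or.inr ⟨k, Or.inr hkmem, hget⟩
      · rintro (hs | ⟨k, (rfl | hkmem), hget⟩)
        · exact Or.inl hs
        · rw [hk] at hget; exact absurd hget (by simp)
        · exact Or.inr ⟨k, hkmem, hget⟩
    | some topic =>
      rw [ih]
      simp only [PySem.Set.mem_add]
      constructor
      · rintro ((hs | rfl) | ⟨k, hkmem, hget⟩)
        · exact Or.inl hs
        · exact Or.inr ⟨h, Or.inl rfl, hk⟩
        · exact Or.inr ⟨k, Or.inr hkmem, hget⟩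
      · rintro (hs | ⟨k, (rfl | hkmem), hget⟩)
        · exact Or.inl (Or.inl hs)
        · rw [hk] at hget; exact Or.inl (Or.inr (Option.some_injective _ hget).symm)
        · exact Or.inr ⟨k, hkmem, hget⟩

theorem mem_pvPresent (keywords : List String) (t : String) :
    t ∈ pvPresent keywords ↔ ∃ k ∈ keywords, PySem.Dict.get? pvKwIndex k = some t := by
  rw [pvPresent, mem_pvPresent_fold]
  simp [PySem.Set.empty]

-- first-match lookup in an association list with distinct keys, characterised by the keys carrying value t
theorem find?_alist_iff (t k : String) : ∀ (pairs : List (String × String)),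
    (pairs.map Prod.fst).Nodup →
    ((List.find? (fun p => p.1 == k) pairs).map (fun x => x.2) = some t ↔
      k ∈ (pairs.filter (fun p => p.2 == t)).map Prod.fst) := by
  intro pairs
  induction pairs with
  | nil => simp
  | cons a rest ih =>
    intro hnd
    rw [List.map_cons, List.nodup_cons] at hnd
    obtain ⟨ha, hnd'⟩ := hnd
    by_cases hk : a.1 = k
    · rw [List.find?_cons_of_pos (by simp [hk])]
      by_cases ht : a.2 = t
      · simp [ht, hk]
      · simp only [List.filter_cons, Option.map_some]
        rw [if_neg (by simp [ht])]
        constructor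
        · intro hc; exact absurd (Option.some_injective _ hc) ht
        · intro hc
          exfalso
          apply ha
          rw [hk]
          exact List.mem_map.mp hc |>.elim (fun p hp => List.mem_map.mpr ⟨p, List.mem_of_mem_filter hp.1, hp.2⟩)
    · rw [List.find?_cons_of_neg (by simp [hk])]
      rw [ih hnd']
      by_cases ht : a.2 = t
      · simp [ht, Ne.symm hk]
      · simp [ht]

-- the inverted index maps k to topic t exactly when k is one of t's phrases
theorem kwIndex_get?_iff (t : String) (phr : List String) (k : String)
    (h1 : (pvKwIndex.items.filter (fun p => p.2 == t)).map Prod.fst = phr) :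
    PySem.Dict.get? pvKwIndex k = some t ↔ k ∈ phr := by
  have := find?_alist_iff t k pvKwIndex.items (by decide)
  rw [h1] at this
  exact this

-- B's present-test agrees with A's per-topic phrase scan, for each topic of the mapping
theorem contains_pvPresent_eq (keywords : List String) (t : String) (phr : List String)
    (hmem : ∀ k : String, PySem.Dict.get? pvKwIndex k = some t ↔ k ∈ phr) :
    PySem.Set.contains (pvPresent keywords) t = phr.any (fun kw => keywords.contains kw) := by
  rw [Bool.eq_iff_iff]
  simp only [PySem.Set.contains_iff, mem_pvPresent, List.any_eq_true, List.contains_iff_mem]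
  constructor
  · rintro ⟨k, hk, hget⟩; exact ⟨k, (hmem k).mp hget, hk⟩
  · rintro ⟨kw, hphr, hkw⟩; exact ⟨kw, hkw, (hmem kw).mpr hphr⟩

-- ===== VERDICT (by name: the statement is the Claim_ definition above) =====
theorem get_topic_from_keywords_py_spec : Claim_equal_get_topic_from_keywords_py := by
  intro keywords _
  show _ = _
  rw [get_topic_from_keywords_py, get_topic_from_keywords_py_alt]
  simp only [pvTopicMapping, pvPriority, pvALoop, pvPick, List.map]
  rw [contains_pvPresent_eq keywords "coverage" ["coverage", "benefit", "claim", "policy", "insured"] (kwIndex_get?_iff _ _ · (by decide)),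
      contains_pvPresent_eq keywords "exclusion" ["exclusion", "excluded", "not covered", "limitation"] (kwIndex_get?_iff _ _ · (by decide)),
      contains_pvPresent_eq keywords "premium" ["premium", "payment", "due", "billing", "fee"] (kwIndex_get?_iff _ _ · (by decide)),
      contains_pvPresent_eq keywords "medical" ["medical", "health", "doctor", "hospital", "treatment"] (kwIndex_get?_iff _ _ · (by decide)),
      contains_pvPresent_eq keywords "legal" ["legal", "court", "lawsuit", "liability", "responsibility"] (kwIndex_get?_iff _ _ · (by decide))]
  simp
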